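-- pv_equiv track=rewrite | github.com/anurag-chowdhury1975/bestsecret | src/bestsecret_app.py | get_mismatches
-- ===== SOURCE A (Python) =====
-- def get_mismatches(y_true, y_pred, BATCH_SIZE):
--     num_mismatches = 0
--     mismatch_tensor_indexes = {}
--     for i in range(len(y_true)):
--       if y_true[i] != y_pred[i]:
--         num_mismatches += 1
--         key = (i//BATCH_SIZE)
--         tensor_index = (i % BATCH_SIZE)
--         if mismatch_tensor_indexes.get(key) is not None:
--           mismatch_tensor_indexes[key].append((tensor_index, i))
--         else:
--           mismatch_tensor_indexes[key] = [(tensor_index, i)]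
--     return num_mismatches, mismatch_tensor_indexes
-- ===== SOURCE B (Python) =====
-- def get_mismatches(y_true, y_pred, BATCH_SIZE):
--     # collect-then-group: one filtering pass builds the sorted mismatch indices,
--     # then contiguous runs of equal i // BATCH_SIZE become the dict entries
--     # (i // BATCH_SIZE is monotone in i, so each batch key is one contiguous run).
--     mismatches = [i for i in range(len(y_true)) if y_true[i] != y_pred[i]]
--     runs = []
--     for i in mismatches:
--         key = i // BATCH_SIZE
--         if runs and runs[-1][0] == key:
--             runs[-1][1].append((i % BATCH_SIZE, i))
--         else:
--             runs.append((key, [(i % BATCH_SIZE, i)]))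
--     return len(mismatches), dict(runs)
-- ===== Notes on version B (the rewrite author's own statement) =====
-- stated objective: alternative
-- what changed: Replaces A's count-and-dict-lookup loop with a collect-then-group decomposition: one filtering pass builds the sorted list of mismatched indices, then contiguous runs of equal i//BATCH_SIZE are assembled by comparing each index's key with the last run (no dict membership tests), relying on monotonicity of i//BATCH_SIZE over the sorted indices.
import Mathlib
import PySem

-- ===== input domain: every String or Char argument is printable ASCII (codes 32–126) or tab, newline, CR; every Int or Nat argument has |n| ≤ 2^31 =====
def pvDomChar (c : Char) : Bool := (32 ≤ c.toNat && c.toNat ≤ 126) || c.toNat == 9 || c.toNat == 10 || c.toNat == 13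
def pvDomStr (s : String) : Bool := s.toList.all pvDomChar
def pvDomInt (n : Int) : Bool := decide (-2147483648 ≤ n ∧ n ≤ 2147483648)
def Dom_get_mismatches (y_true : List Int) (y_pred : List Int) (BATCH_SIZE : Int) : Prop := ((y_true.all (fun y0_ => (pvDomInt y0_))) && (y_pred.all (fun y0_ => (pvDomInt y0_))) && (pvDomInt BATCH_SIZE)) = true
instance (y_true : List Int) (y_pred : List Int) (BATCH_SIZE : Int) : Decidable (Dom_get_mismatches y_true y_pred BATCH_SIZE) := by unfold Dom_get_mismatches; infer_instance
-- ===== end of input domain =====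

-- B replaces A's count-and-dict-lookup loop by a collect-then-group decomposition
-- (filter the mismatched indices, then group contiguous equal-key runs); same cost,
-- proved equal on all inputs where the Python A returns (Pre_: y_pred long enough,
-- and BATCH_SIZE ≠ 0 unless there is no mismatch).


-- ===== PORT A =====
-- A's loop body: on a mismatch, bump the counter and append to / create the dict entry.
def pvLoopA (y_true : List Int) (y_pred : List Int) (BATCH_SIZE : Int)
    (s : Int × PySem.Dict Int (List (Int × Int))) (i : Int) :
    Int × PySem.Dict Int (List (Int × Int)) :=
  if PySem.List.pyGetD y_true i 0 ≠ PySem.List.pyGetD y_pred i 0 then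
    let key := PySem.Int.floordiv i BATCH_SIZE
    let tensor_index := PySem.Int.mod i BATCH_SIZE
    (s.1 + 1,
      match s.2.get? key with
      | some _ => s.2.modify key [] (fun g => g ++ [(tensor_index, i)])
      | none => s.2.insert key [(tensor_index, i)])
  else s

def get_mismatches (y_true : List Int) (y_pred : List Int) (BATCH_SIZE : Int) : Int × (List (Int × List (Int × Int))) :=
  let r := (PySem.List.pyRange 0 (y_true.length : Int) 1).foldl
    (pvLoopA y_true y_pred BATCH_SIZE) (0, PySem.Dict.empty)
  (r.1, r.2.items)

-- ===== PORT B =====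
-- B's grouping step: extend the last run if its key matches, else start a new run.
def pvRunStep (BATCH_SIZE : Int) (runs : List (Int × List (Int × Int))) (i : Int) :
    List (Int × List (Int × Int)) :=
  let key := PySem.Int.floordiv i BATCH_SIZE
  match runs.getLast? with
  | some last =>
      if last.1 = key then runs.dropLast ++ [(key, last.2 ++ [(PySem.Int.mod i BATCH_SIZE, i)])]
      else runs ++ [(key, [(PySem.Int.mod i BATCH_SIZE, i)])]
  | none => runs ++ [(key, [(PySem.Int.mod i BATCH_SIZE, i)])]

def get_mismatches_alt (y_true : List Int) (y_pred : List Int) (BATCH_SIZE : Int) : Int × (List (Int × List (Int × Int))) :=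
  let mismatches := (PySem.List.pyRange 0 (y_true.length : Int) 1).filter
    (fun i => decide (PySem.List.pyGetD y_true i 0 ≠ PySem.List.pyGetD y_pred i 0))
  ((mismatches.length : Int), mismatches.foldl (pvRunStep BATCH_SIZE) [])

-- ===== PRECONDITION & SPEC =====
-- Pre_ excludes exactly the inputs where Python A raises: y_pred shorter than y_true
-- (IndexError), and BATCH_SIZE = 0 with at least one mismatch (ZeroDivisionError).
def Pre_get_mismatches (y_true : List Int) (y_pred : List Int) (BATCH_SIZE : Int) : Prop :=
  y_true.length ≤ y_pred.length ∧
    (BATCH_SIZE ≠ 0 ∨ ∀ i < y_true.length, y_true.getD i 0 = y_pred.getD i 0)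
instance (y_true : List Int) (y_pred : List Int) (BATCH_SIZE : Int) : Decidable (Pre_get_mismatches y_true y_pred BATCH_SIZE) := by unfold Pre_get_mismatches; infer_instance
def pvWitness_get_mismatches : List Int × List Int × Int := ([1, 2, 3], [1, 0, 0], 2)

def Spec_get_mismatches (y_true : List Int) (y_pred : List Int) (BATCH_SIZE : Int) (out : Int × (List (Int × List (Int × Int)))) : Prop := out = get_mismatches_alt y_true y_pred BATCH_SIZE
instance (y_true : List Int) (y_pred : List Int) (BATCH_SIZE : Int) (out : Int × (List (Int × List (Int × Int)))) : Decidable (Spec_get_mismatches y_true y_pred BATCH_SIZE out) := by unfold Spec_get_mismatches; infer_instance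

-- ===== CLAIM (what is proved, stated in full; the proofs are below) =====
def Claim_equal_get_mismatches : Prop := ∀ (y_true : List Int) (y_pred : List Int) (BATCH_SIZE : Int), Dom_get_mismatches y_true y_pred BATCH_SIZE → Pre_get_mismatches y_true y_pred BATCH_SIZE → Spec_get_mismatches y_true y_pred BATCH_SIZE (get_mismatches y_true y_pred BATCH_SIZE)

-- ===== LEMMAS AND PROOFS =====

-- counting loop: each processed element adds one
lemma pv_foldl_count (l : List Int) (c0 : Int) :
    l.foldl (fun c _ => c + 1) c0 = c0 + l.length := by
  induction l generalizing c0 with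
  | nil => simp
  | cons x l ih => simp [List.foldl, ih]; omega

-- floor division is monotone in the dividend for a positive divisor
lemma pv_fdiv_mono_pos {b : Int} (hb : 0 < b) {a c : Int} (h : a ≤ c) :
    PySem.Int.floordiv a b ≤ PySem.Int.floordiv c b := by
  simp only [PySem.Int.floordiv, Int.fdiv_eq_ediv_of_nonneg _ hb.le]
  exact Int.ediv_le_ediv hb h

-- and antitone for a negative divisor
lemma pv_fdiv_anti_neg {b : Int} (hb : b < 0) {a c : Int} (h : a ≤ c) :
    PySem.Int.floordiv c b ≤ PySem.Int.floordiv a b := by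
  by_contra hlt
  push Not at hlt
  have ha := PySem.Int.floordiv_mul_add_mod a b
  have hc := PySem.Int.floordiv_mul_add_mod c b
  have hra := PySem.Int.mod_neg_bounds a hb
  have hrc := PySem.Int.mod_neg_bounds c hb
  nlinarith [mul_le_mul_of_nonpos_right (by omega : PySem.Int.floordiv a b + 1 ≤ PySem.Int.floordiv c b) hb.le]

-- core invariant: folding A's dict step and B's run step over a key-monotone list
-- from matching states gives the same association list.  mk is an injective measure
-- under which the keys of the processed elements are nondecreasing; every non-last
-- stored key lies strictly below all future keys, the last one weakly below.
lemma pv_run_inv (key : Int → Int) (val : Int → Int × Int) (mk : Int → Int)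
    (hinj : Function.Injective mk) :
    ∀ (l : List Int) (d : PySem.Dict Int (List (Int × Int))),
      l.Pairwise (fun x y => mk (key x) ≤ mk (key y)) →
      (∀ x ∈ l, ∀ p ∈ d.items.dropLast, mk p.1 < mk (key x)) →
      (∀ x ∈ l, ∀ p ∈ d.items.getLast?, mk p.1 ≤ mk (key x)) →
      (l.foldl (fun s i =>
          match s.get? (key i) with
          | some _ => s.modify (key i) [] (fun g => g ++ [val i])
          | none => s.insert (key i) [val i]) d).items
        = l.foldl (fun runs i =>
          match runs.getLast? with
          | some last =>
              if last.1 = key i then runs.dropLast ++ [(key i, last.2 ++ [val i])]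
              else runs ++ [(key i, [val i])]
          | none => runs ++ [(key i, [val i])]) d.items := by
  intro l
  induction l with
  | nil => intro d _ _ _; rfl
  | cons x l ih =>
    intro d hmono hhead hlast
    rw [List.pairwise_cons] at hmono
    obtain ⟨hx, hmono⟩ := hmono
    rcases List.eq_nil_or_concat d.items with hnil | ⟨init, p, hconcat⟩
    · -- empty dict: both create the first entry
      have hget : d.get? (key x) = none := by
        simp [PySem.Dict.get?, hnil]
      have hins : (d.insert (key x) [val x]).items = [(key x, [val x])] := by
        simp [PySem.Dict.insert, PySem.Dict.contains, hnil]
      have h1 : ∀ y ∈ l, ∀ q ∈ (d.insert (key x) [val x]).items.dropLast, mk q.1 < mk (key y) := by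
        intro y hy q hq; rw [hins] at hq; simp at hq
      have h2 : ∀ y ∈ l, ∀ q ∈ (d.insert (key x) [val x]).items.getLast?, mk q.1 ≤ mk (key y) := by
        intro y hy q hq
        rw [hins] at hq
        simp at hq
        rw [← hq]
        exact hx y hy
      simp only [List.foldl, hget]
      rw [ih (d.insert (key x) [val x]) hmono h1 h2, hins, hnil]
      rfl
    · rw [List.concat_eq_append] at hconcat
      have hplex : mk p.1 ≤ mk (key x) := by
        apply hlast x (by simp) p
        rw [hconcat, List.getLast?_concat]; rfl
      have hF : ∀ q ∈ init, q.1 ≠ key x := by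
        intro q hq
        have := hhead x (by simp) q (by rw [hconcat, List.dropLast_concat]; exact hq)
        intro h; rw [h] at this; omega
      have hfind_init : init.find? (fun q => q.1 == key x) = none := by
        rw [List.find?_eq_none]
        intro q hq; simpa using hF q hq
      by_cases hpk : p.1 = key x
      · -- key present, at the last slot: modify = rewrite the last entry
        have hget : d.get? (key x) = some p.2 := by
          simp [PySem.Dict.get?, hconcat, List.find?_append, hfind_init, hpk]
        have hcont : d.contains (key x) = true := by
          simp only [PySem.Dict.contains, hconcat, List.any_append, List.any_cons,
            List.any_nil, Bool.or_false, hpk, BEq.rfl, Bool.or_true]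
        have hmod : (d.modify (key x) [] (fun g => g ++ [val x])).items
            = init ++ [(key x, p.2 ++ [val x])] := by
          simp only [PySem.Dict.modify, PySem.Dict.getD, hget, Option.getD_some,
            PySem.Dict.insert, hcont, if_pos]
          rw [hconcat, List.map_append]
          congr 1
          · calc List.map (fun q => if (q.1 == key x) = true then (key x, p.2 ++ [val x]) else q) init
                = List.map id init := List.map_congr_left (fun q hq => by simp [hF q hq])
              _ = init := List.map_id init
          · simp [hpk]
        have h1 : ∀ y ∈ l, ∀ q ∈ (d.modify (key x) [] (fun g => g ++ [val x])).items.dropLast, mk q.1 < mk (key y) := by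
          intro y hy q hq
          rw [hmod, List.dropLast_concat] at hq
          calc mk q.1 < mk (key x) := hhead x (by simp) q (by rw [hconcat, List.dropLast_concat]; exact hq)
            _ ≤ mk (key y) := hx y hy
        have h2 : ∀ y ∈ l, ∀ q ∈ (d.modify (key x) [] (fun g => g ++ [val x])).items.getLast?, mk q.1 ≤ mk (key y) := by
          intro y hy q hq
          rw [hmod, List.getLast?_concat] at hq
          simp at hq
          rw [← hq]
          simpa using hx y hy
        simp only [List.foldl, hget]
        rw [ih _ hmono h1 h2, hmod, hconcat]
        congr 1
        simp only [List.getLast?_concat, List.dropLast_concat]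
        rw [if_pos hpk]
      · -- key absent: insert appends, B starts a new run
        have hget : d.get? (key x) = none := by
          simp [PySem.Dict.get?, hconcat, List.find?_append, hfind_init, hpk]
        have hcont : d.contains (key x) = false := by
          simp only [PySem.Dict.contains, hconcat, List.any_append, Bool.or_eq_false_iff]
          constructor
          · rw [List.any_eq_false]; intro q hq; simpa using hF q hq
          · simp [hpk]
        have hins : (d.insert (key x) [val x]).items = d.items ++ [(key x, [val x])] := by
          simp [PySem.Dict.insert, hcont]
        have h1 : ∀ y ∈ l, ∀ q ∈ (d.insert (key x) [val x]).items.dropLast, mk q.1 < mk (key y) := by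
          intro y hy q hq
          rw [hins, List.dropLast_concat, hconcat] at hq
          rcases List.mem_append.1 hq with hq | hq
          · calc mk q.1 < mk (key x) := hhead x (by simp) q (by rw [hconcat, List.dropLast_concat]; exact hq)
              _ ≤ mk (key y) := hx y hy
          · simp at hq
            rw [hq]
            have hne : mk p.1 ≠ mk (key x) := fun h => hpk (hinj h)
            calc mk p.1 < mk (key x) := lt_of_le_of_ne hplex hne
              _ ≤ mk (key y) := hx y hy
        have h2 : ∀ y ∈ l, ∀ q ∈ (d.insert (key x) [val x]).items.getLast?, mk q.1 ≤ mk (key y) := by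
          intro y hy q hq
          rw [hins, List.getLast?_concat] at hq
          simp at hq
          rw [← hq]
          simpa using hx y hy
        simp only [List.foldl, hget]
        rw [ih _ hmono h1 h2, hins, hconcat]
        congr 1
        simp only [List.getLast?_concat]
        rw [if_neg hpk]

-- the dict step of A's loop, on its own (defeq to the second component of pvLoopA's mismatch branch)
def pvDStep (B : Int) (d : PySem.Dict Int (List (Int × Int))) (i : Int) : PySem.Dict Int (List (Int × Int)) :=
  match d.get? (PySem.Int.floordiv i B) with
  | some _ => d.modify (PySem.Int.floordiv i B) [] (fun g => g ++ [(PySem.Int.mod i B, i)])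
  | none => d.insert (PySem.Int.floordiv i B) [(PySem.Int.mod i B, i)]

-- both ports reduce to folds over the mismatch list; pv_run_inv closes the dict part
theorem get_mismatches_spec : Claim_equal_get_mismatches := by
  intro y_true y_pred BATCH_SIZE _ hpre
  unfold Spec_get_mismatches get_mismatches get_mismatches_alt
  have hA : (PySem.List.pyRange 0 (y_true.length : Int) 1).foldl
        (pvLoopA y_true y_pred BATCH_SIZE) (0, PySem.Dict.empty)
      = ((PySem.List.pyRange 0 (y_true.length : Int) 1).filter
          (fun i => decide (PySem.List.pyGetD y_true i 0 ≠ PySem.List.pyGetD y_pred i 0))).foldl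
          (fun s i => (s.1 + 1, pvDStep BATCH_SIZE s.2 i)) (0, PySem.Dict.empty) := by
    rw [List.foldl_filter]
    congr 1
    funext s i
    by_cases h : PySem.List.pyGetD y_true i 0 ≠ PySem.List.pyGetD y_pred i 0
    · simp [pvLoopA, pvDStep, h]
    · simp [pvLoopA, h]
  simp only [hA, PySem.List.foldl_prod_mk (f := fun (c : Int) (_ : Int) => c + 1)
    (g := fun d i => pvDStep BATCH_SIZE d i), pv_foldl_count]
  set mism := (PySem.List.pyRange 0 (y_true.length : Int) 1).filter
    (fun i => decide (PySem.List.pyGetD y_true i 0 ≠ PySem.List.pyGetD y_pred i 0)) with hmism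
  refine Prod.ext (by simp) ?_
  show (mism.foldl (fun d i => pvDStep BATCH_SIZE d i) PySem.Dict.empty).items
      = mism.foldl (pvRunStep BATCH_SIZE) []
  rcases lt_trichotomy BATCH_SIZE 0 with hb | hb | hb
  · -- negative batch size: keys are antitone, measure them by negation
    refine pv_run_inv (fun i => PySem.Int.floordiv i BATCH_SIZE)
      (fun i => (PySem.Int.mod i BATCH_SIZE, i)) (fun k => -k) neg_injective mism
      PySem.Dict.empty ?_ ?_ ?_
    · refine List.Pairwise.imp ?_
        ((PySem.List.pairwise_lt_pyRange_one 0 (y_true.length : Int)).filter _)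
      intro a b hab
      simpa using pv_fdiv_anti_neg hb hab.le
    · intro x _ q hq; simp [PySem.Dict.empty] at hq
    · intro x _ q hq; simp [PySem.Dict.empty] at hq
  · -- BATCH_SIZE = 0: Pre_ forces the mismatch list to be empty
    have hnil : mism = [] := by
      rw [hmism, List.filter_eq_nil_iff]
      intro i hi
      rw [PySem.List.mem_pyRange_one] at hi
      rcases hpre with ⟨hlen, hzero | hall⟩
      · exact absurd hb hzero
      · have h1 : i.toNat < y_true.length := by omega
        simp only [decide_eq_true_eq, not_not]
        rw [PySem.List.pyGetD_eq_getElem y_true 0 hi.1 hi.2,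
          PySem.List.pyGetD_eq_getElem y_pred 0 hi.1 (by omega)]
        have := hall i.toNat h1
        rwa [List.getD_eq_getElem _ _ h1, List.getD_eq_getElem _ _ (by omega)] at this
    rw [hnil]
    rfl
  · -- positive batch size: keys are monotone, the measure is the key itself
    refine pv_run_inv (fun i => PySem.Int.floordiv i BATCH_SIZE)
      (fun i => (PySem.Int.mod i BATCH_SIZE, i)) (fun k => k) (fun a b h => h) mism
      PySem.Dict.empty ?_ ?_ ?_
    · refine List.Pairwise.imp ?_
        ((PySem.List.pairwise_lt_pyRange_one 0 (y_true.length : Int)).filter _)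
      intro a b hab
      exact pv_fdiv_mono_pos hb hab.le
    · intro x _ q hq; simp [PySem.Dict.empty] at hq
    · intro x _ q hq; simp [PySem.Dict.empty] at hq
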